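-- pv_equiv track=rewrite | github.com/vcentfu/BioInfoProteins | 2I013_Projet_Struct_proteine.py | FilterP
-- ===== SOURCE A (Python) =====
-- def FilterP (p) :
--
--     """ list [list [int]] -> list [list [int]]
--         p : tableau a filtrer
--
--         Retourne le tableau p filtre. """
--
--     s = set ();
--
--     for i in range (len (p)) :
--         for j in range (i + 1, len (p)) :
--             if p[i] == p[j] :
--                 s.add (j)
--             if p[i] < p[j] :
--                 s.add (i)
--             if p[i] > p[j] :
--                 s.add (j)
--
--     copy_p = []
--
--     for l in range (len (p)) :
--         if l in s :
--             continue
--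
--         copy_p.append (p[l])
--
--     return copy_p
-- ===== SOURCE B (Python) =====
-- def FilterP (p) :
--     """ list [list [int]] -> list [list [int]]
--         Single linear scan keeping the first-occurrence running maximum. """
--     seen = False
--     best = None
--     for e in p :
--         if not seen :
--             best = e
--             seen = True
--         elif e > best :
--             best = e
--     return [best] if seen else []
-- ===== Notes on version B (the rewrite author's own statement) =====
-- stated objective: faster
-- what changed: Replaces A's O(n^2) all-pairs comparison building a removal set with a single linear running-maximum scan that keeps the first occurrence of the maximum.
import Mathlib
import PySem

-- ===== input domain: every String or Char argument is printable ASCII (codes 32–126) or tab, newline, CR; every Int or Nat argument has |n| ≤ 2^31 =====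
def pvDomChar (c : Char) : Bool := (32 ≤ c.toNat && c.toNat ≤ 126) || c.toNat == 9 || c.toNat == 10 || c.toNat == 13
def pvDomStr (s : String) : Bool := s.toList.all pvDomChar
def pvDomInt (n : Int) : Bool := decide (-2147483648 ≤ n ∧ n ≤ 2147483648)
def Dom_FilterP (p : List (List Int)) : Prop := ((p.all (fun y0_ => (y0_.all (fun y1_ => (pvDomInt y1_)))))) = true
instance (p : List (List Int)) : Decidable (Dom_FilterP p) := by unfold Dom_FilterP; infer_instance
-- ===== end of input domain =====

-- B replaces A's quadratic all-pairs removal-set construction by a single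
-- linear running-maximum scan (first occurrence kept): measurably faster.

-- ===== PORT A =====
-- p[i] with the loop's Int index (always in range here)
def pvG (p : List (List Int)) (i : Int) : List Int := PySem.List.pyGetD p i []

-- body of the inner 'for j' loop: the three conditional set.add calls
def pvInner (p : List (List Int)) (i : Int) (s : PySem.Set Int) (j : Int) : PySem.Set Int :=
  let s1 := if pvG p i = pvG p j then PySem.Set.add s j else s
  let s2 := if pvG p i < pvG p j then PySem.Set.add s1 i else s1
  if pvG p j < pvG p i then PySem.Set.add s2 j else s2

-- the set s after the double loop
def pvS (p : List (List Int)) : PySem.Set Int :=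
  (PySem.List.pyRange 0 (PySem.List.len p)).foldl
    (fun s i => (PySem.List.pyRange (i + 1) (PySem.List.len p)).foldl (pvInner p i) s)
    PySem.Set.empty

def FilterP (p : List (List Int)) : List (List Int) :=
  (PySem.List.pyRange 0 (PySem.List.len p)).foldl
    (fun acc l => if PySem.Set.contains (pvS p) l then acc else acc ++ [pvG p l]) []

-- ===== PORT B =====
-- one step of B's scan: the seen/best pair is an Option
def pvBestStep (best : Option (List Int)) (e : List Int) : Option (List Int) :=
  match best with
  | none => some e
  | some b => if b < e then some e else some b

def FilterP_alt (p : List (List Int)) : List (List Int) :=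
  match p.foldl pvBestStep none with
  | none => []
  | some b => [b]

-- ===== PRECONDITION & SPEC =====
def Spec_FilterP (p : List (List Int)) (out : List (List Int)) : Prop := out = FilterP_alt p
instance (p : List (List Int)) (out : List (List Int)) : Decidable (Spec_FilterP p out) := by unfold Spec_FilterP; infer_instance

-- ===== CLAIM (what is proved, stated in full; the proofs are below) =====
def Claim_equal_FilterP : Prop := ∀ (p : List (List Int)), Dom_FilterP p → Spec_FilterP p (FilterP p)

-- ===== LEMMAS AND PROOFS =====

-- the condition under which index x is added to s while comparing p[i] with p[j]
def pvAddCond (p : List (List Int)) (i j x : Int) : Prop :=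
  (pvG p i = pvG p j ∧ x = j) ∨ (pvG p i < pvG p j ∧ x = i) ∨ (pvG p j < pvG p i ∧ x = j)

theorem mem_pvInner (p : List (List Int)) (i : Int) (s : PySem.Set Int) (j x : Int) :
    x ∈ pvInner p i s j ↔ x ∈ s ∨ pvAddCond p i j x := by
  unfold pvInner pvAddCond
  split_ifs with h1 h2 h3 <;> simp [PySem.Set.mem_add] <;> tauto

theorem mem_inner_fold (p : List (List Int)) (i : Int) (L : List Int) (s : PySem.Set Int) (x : Int) :
    x ∈ L.foldl (pvInner p i) s ↔ x ∈ s ∨ ∃ j ∈ L, pvAddCond p i j x := by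
  induction L generalizing s with
  | nil => simp
  | cons j L ih => simp [List.foldl_cons, ih, mem_pvInner]; tauto

theorem mem_outer_fold (p : List (List Int)) (L : List Int) (s : PySem.Set Int) (x : Int) :
    x ∈ L.foldl (fun s i => (PySem.List.pyRange (i + 1) (PySem.List.len p)).foldl (pvInner p i) s) s
      ↔ x ∈ s ∨ ∃ i ∈ L, ∃ j, i + 1 ≤ j ∧ j < PySem.List.len p ∧ pvAddCond p i j x := by
  induction L generalizing s with
  | nil => simp
  | cons i L ih =>
      simp only [List.foldl_cons, ih, mem_inner_fold, PySem.List.mem_pyRange_one]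
      constructor
      · rintro (⟨h | ⟨j, ⟨hj1, hj2⟩, hc⟩⟩ | h)
        · exact Or.inl h
        · exact Or.inr ⟨i, by simp, j, hj1, hj2, hc⟩
        · rcases h with ⟨i', hi', rest⟩; exact Or.inr ⟨i', by simp [hi'], rest⟩
      · rintro (h | ⟨i', hi', j, hj1, hj2, hc⟩)
        · exact Or.inl (Or.inl h)
        · rcases List.mem_cons.mp hi' with rfl | hi'
          · exact Or.inl (Or.inr ⟨j, ⟨hj1, hj2⟩, hc⟩)
          · exact Or.inr ⟨i', hi', j, hj1, hj2, hc⟩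

theorem mem_pvS (p : List (List Int)) (x : Int) :
    x ∈ pvS p ↔ ∃ i, 0 ≤ i ∧ i < PySem.List.len p ∧
      ∃ j, i + 1 ≤ j ∧ j < PySem.List.len p ∧ pvAddCond p i j x := by
  unfold pvS
  rw [mem_outer_fold]
  simp only [PySem.Set.empty, List.not_mem_nil, false_or, PySem.List.mem_pyRange_one]
  exact exists_congr fun i => and_assoc

-- shorthand for p[k] with a Nat index
def pvGN (p : List (List Int)) (k : Nat) : List Int := p.getD k []

theorem pvG_natCast (p : List (List Int)) (k : Nat) : pvG p (k : Int) = pvGN p k := by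
  simp [pvG, pvGN, PySem.List.pyGetD_natCast]

-- index l (< n) survives the filter iff every earlier element is strictly
-- smaller and every later element is ≤ : i.e. l is the first maximum position
theorem not_mem_pvS_iff (p : List (List Int)) (l : Nat) (hl : l < p.length) :
    ((l : Int) ∉ pvS p) ↔
      (∀ i < l, pvGN p i < pvGN p l) ∧ (∀ j, l < j → j < p.length → pvGN p j ≤ pvGN p l) := by
  rw [mem_pvS]
  constructor
  · intro h
    constructor
    · intro i hi
      by_contra hle
      push Not at hle
      rcases lt_or_eq_of_le hle with hlt | heq
      · exact h ⟨(i : Int), by positivity, by simp [PySem.List.len_eq]; omega,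
          (l : Int), by omega, by simp [PySem.List.len_eq]; omega,
          Or.inr (Or.inr ⟨by simpa [pvG_natCast] using hlt, rfl⟩)⟩
      · exact h ⟨(i : Int), by positivity, by simp [PySem.List.len_eq]; omega,
          (l : Int), by omega, by simp [PySem.List.len_eq]; omega,
          Or.inl ⟨by simpa [pvG_natCast] using heq.symm, rfl⟩⟩
    · intro j hlj hjn
      by_contra hle
      push Not at hle
      exact h ⟨(l : Int), by positivity, by simp [PySem.List.len_eq]; omega,
        (j : Int), by omega, by simp [PySem.List.len_eq]; omega,
        Or.inr (Or.inl ⟨by simpa [pvG_natCast] using hle, rfl⟩)⟩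
  · rintro ⟨hbefore, hafter⟩ ⟨i, hi0, hin, j, hij, hjn, hc⟩
    simp only [PySem.List.len_eq] at hin hjn
    -- turn i, j into Nats
    obtain ⟨i', rfl⟩ : ∃ i' : Nat, (i' : Int) = i := ⟨i.toNat, by omega⟩
    obtain ⟨j', rfl⟩ : ∃ j' : Nat, (j' : Int) = j := ⟨j.toNat, by omega⟩
    have hin' : i' < p.length := by exact_mod_cast hin
    have hjn' : j' < p.length := by exact_mod_cast hjn
    have hij' : i' < j' := by exact_mod_cast (by omega : (i' : Int) < j')
    rcases hc with ⟨heq, hx⟩ | ⟨hlt, hx⟩ | ⟨hlt, hx⟩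
    · -- l = j', p[i'] = p[l], i' < l : contradicts strictness before l
      have hl' : l = j' := by exact_mod_cast hx
      subst hl'
      have := hbefore i' hij'
      rw [pvG_natCast, pvG_natCast] at heq
      exact absurd heq this.ne
    · -- l = i', p[l] < p[j'], l < j' : contradicts maximality after l
      have hl' : l = i' := by exact_mod_cast hx
      subst hl'
      have := hafter j' hij' hjn'
      rw [pvG_natCast, pvG_natCast] at hlt
      exact absurd hlt (not_lt.mpr this)
    · -- l = j', p[j'] < p[i'], i' < l : contradicts strictness before l
      have hl' : l = j' := by exact_mod_cast hx
      subst hl'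
      have := hbefore i' hij'
      rw [pvG_natCast, pvG_natCast] at hlt
      exact absurd this (not_lt.mpr hlt.le)

-- FilterP as a filter of the index range
theorem FilterP_eq_filter (p : List (List Int)) :
    FilterP p = ((List.range p.length).filter
        (fun (l : Nat) => decide ((l : Int) ∉ pvS p))).map (pvGN p) := by
  unfold FilterP
  rw [PySem.List.len_eq, PySem.List.pyRange_zero_natCast, List.foldl_map]
  have hcongr : ∀ (acc : List (List Int)), ∀ k ∈ List.range p.length,
      (if PySem.Set.contains (pvS p) (k : Int) then acc else acc ++ [pvG p (k : Int)]) =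
      (if ((k : Int) ∉ pvS p) then acc ++ [pvGN p k] else acc) := by
    intro acc k _
    by_cases h : (k : Int) ∈ pvS p
    · simp [h]
    · have : PySem.Set.contains (pvS p) (k : Int) = false := by
        by_contra hc
        exact h ((PySem.Set.contains_iff _ _).mp (by simpa using hc))
      simp [h, pvG_natCast]
  rw [PySem.List.foldl_congr_mem _ _ _ _ hcongr]
  simpa using PySem.List.foldl_append_ite (fun k : Nat => ((k : Int) ∉ pvS p)) (pvGN p) (List.range p.length) []

-- a filter over range n with a predicate true at exactly one l < n is [l]
theorem filter_range_eq_singleton (q : Nat → Bool) (n l : Nat) (hl : l < n) (hq : q l = true)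
    (huniq : ∀ k, k < n → q k = true → k = l) : (List.range n).filter q = [l] := by
  induction n with
  | zero => omega
  | succ n ih =>
      rw [List.range_succ, List.filter_append]
      by_cases hln : l = n
      · subst hln
        have : (List.range l).filter q = [] := by
          rw [List.filter_eq_nil_iff]
          intro k hk
          simp only [List.mem_range] at hk
          intro hqk
          exact absurd (huniq k (by omega) hqk) (by omega)
        simp [this, hq]
      · have hl' : l < n := by omega
        have hqn : q n = false := by
          by_contra hc
          exact hln (huniq n (by omega) (by simpa using hc)).symm
        rw [ih hl' (fun k hk hqk => huniq k (by omega) hqk)]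
        simp [hqn]

-- B's fold computes the running maximum (strict comparison keeps the first occurrence)
theorem foldl_pvBestStep (xs : List (List Int)) (b : List Int) :
    xs.foldl pvBestStep (some b) = some (xs.foldl max b) := by
  induction xs generalizing b with
  | nil => rfl
  | cons e xs ih =>
      simp only [List.foldl_cons, pvBestStep]
      rcases lt_or_ge b e with h | h
      · rw [if_pos h, ih, max_eq_right h.le]
      · rw [if_neg (not_lt.mpr h), ih, max_eq_left h]

-- minimality of idxOf
theorem getElem_ne_of_lt_idxOf (l : List (List Int)) (x : List Int) (i : Nat)
    (hi : i < l.idxOf x) (hil : i < l.length) : l[i] ≠ x := by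
  induction l generalizing i with
  | nil => simp at hil
  | cons a l ih =>
      by_cases hax : a = x
      · simp [hax, List.idxOf_cons_self] at hi
      · rw [List.idxOf_cons_ne _ (by simpa using hax)] at hi
        cases i with
        | zero => simpa using hax
        | succ i => exact ih i (by omega) (by simpa using hil)

theorem FilterP_spec_aux (p : List (List Int)) : FilterP p = FilterP_alt p := by
  cases p with
  | nil => rfl
  | cons x xs =>
      set M : List Int := xs.foldl max x with hM
      have hBalt : FilterP_alt (x :: xs) = [M] := by
        unfold FilterP_alt
        rw [List.foldl_cons, show pvBestStep none x = some x from rfl, foldl_pvBestStep]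
      set p := x :: xs
      have hMmem : M ∈ p := by
        rcases PySem.List.foldl_max_mem xs x with h | h
        · rw [hM, h]; exact List.mem_cons_self
        · exact List.mem_cons_of_mem _ (hM ▸ h)
      have hMmax : ∀ y ∈ p, y ≤ M := by
        intro y hy
        rcases List.mem_cons.mp hy with rfl | hy
        · exact hM ▸ (PySem.List.le_foldl_max xs y).1
        · exact hM ▸ (PySem.List.le_foldl_max xs x).2 y hy
      set m := p.idxOf M with hm
      have hmlt : m < p.length := List.idxOf_lt_length_of_mem hMmem
      have hpm : pvGN p m = M := by
        have h := List.getElem?_idxOf hMmem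
        simp [pvGN, List.getD_eq_getElem?_getD, hm, h]
      -- m satisfies the keep condition
      have hkeepm : ((m : Int) ∉ pvS p) := by
        rw [not_mem_pvS_iff p m hmlt]
        constructor
        · intro i hi
          have hne : p[i]'(by omega) ≠ M := getElem_ne_of_lt_idxOf p M i (hm ▸ hi) (by omega)
          have hle : p[i]'(by omega) ≤ M := hMmax _ (List.getElem_mem _)
          have : pvGN p i = p[i]'(by omega) := by simp [pvGN, List.getD_eq_getElem?_getD, List.getElem?_eq_getElem (by omega : i < p.length)]
          rw [this, hpm]
          exact lt_of_le_of_ne hle hne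
        · intro j _ hj
          have : pvGN p j = p[j]'hj := by simp [pvGN, List.getD_eq_getElem?_getD, List.getElem?_eq_getElem hj]
          rw [this, hpm]
          exact hMmax _ (List.getElem_mem _)
      -- any kept index equals m
      have huniq : ∀ k, k < p.length → ((k : Int) ∉ pvS p) → k = m := by
        intro k hk hkeep
        rw [not_mem_pvS_iff p k hk] at hkeep
        rw [not_mem_pvS_iff p m hmlt] at hkeepm
        rcases lt_trichotomy k m with h | h | h
        · -- k < m : kept m says p[k] < p[m]; kept k says p[m] ≤ p[k]
          have h1 := hkeepm.1 k h
          have h2 := hkeep.2 m h hmlt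
          exact absurd h1 (not_lt.mpr h2)
        · exact h
        · have h1 := hkeep.1 m h
          have h2 := hkeepm.2 k h hk
          exact absurd h1 (not_lt.mpr h2)
      rw [FilterP_eq_filter, hBalt]
      rw [filter_range_eq_singleton _ p.length m hmlt (by simpa using hkeepm)
        (fun k hk hqk => huniq k hk (by simpa using hqk))]
      simp [hpm]

-- ===== VERDICT (by name: the statement is the Claim_ definition above) =====
theorem FilterP_spec : Claim_equal_FilterP := by
  intro p _
  unfold Spec_FilterP
  exact FilterP_spec_aux p
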